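-- pv_equiv track=rewrite | github.com/Mkurian99/Motif-Repository-for-LOTR | SE_Calculator_with_Peak_Valley_Analysis.py | count_motifs_in_window
-- ===== SOURCE A (Python) =====
-- def count_motifs_in_window(window_tokens, motif_dict):
--     """
--     Count motif occurrences in a window using whole-word matching.
--
--     Args:
--         window_tokens (list): List of tokens in current window
--         motif_dict (dict): Dictionary of {category: [words]}
--
--     Returns:
--         dict: {category: count} for each motif category
--     """
--     counts = {category: 0 for category in motif_dict.keys()}
--     window_set = set(window_tokens)
--
--     for category, words in motif_dict.items():
--         for word in words:
--             if word in window_set: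
--                 counts[category] += window_tokens.count(word)
--
--     return counts
-- ===== SOURCE B (Python) =====
-- def count_motifs_in_window(window_tokens, motif_dict):
--     """Count motif occurrences per category using an inverted word->categories index."""
--     counts = {}
--     index = {}
--     for category, words in motif_dict.items():
--         counts[category] = 0
--         for word in words:
--             index.setdefault(word, []).append(category)
--     for token in window_tokens:
--         for category in index.get(token, []):
--             counts[category] += 1
--     return counts
-- ===== Notes on version B (the rewrite author's own statement) =====
-- stated objective: faster
-- what changed: Replaced the per-word set-membership test plus a repeated window_tokens.count scan per matching word by an inverted word-to-categories index built once from motif_dict, followed by a single counting pass over window_tokens.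
import Mathlib
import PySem

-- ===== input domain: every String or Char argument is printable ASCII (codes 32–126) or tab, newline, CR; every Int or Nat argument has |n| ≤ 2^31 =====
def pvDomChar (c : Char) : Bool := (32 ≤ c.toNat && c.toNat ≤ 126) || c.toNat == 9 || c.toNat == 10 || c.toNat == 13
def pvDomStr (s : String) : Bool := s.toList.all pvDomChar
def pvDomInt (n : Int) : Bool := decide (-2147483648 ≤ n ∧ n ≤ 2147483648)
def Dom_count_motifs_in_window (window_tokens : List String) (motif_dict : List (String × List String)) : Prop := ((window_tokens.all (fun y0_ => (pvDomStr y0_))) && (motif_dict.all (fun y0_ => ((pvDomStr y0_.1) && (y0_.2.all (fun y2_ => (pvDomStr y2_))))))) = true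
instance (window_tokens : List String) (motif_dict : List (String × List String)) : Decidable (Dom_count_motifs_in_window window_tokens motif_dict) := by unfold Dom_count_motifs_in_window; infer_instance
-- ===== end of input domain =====

-- B replaces A's per-word set-membership test plus repeated window_tokens.count scans by an
-- inverted word->categories index built once, then a single counting pass over window_tokens.

-- ===== PORT A =====
def count_motifs_in_window (window_tokens : List String) (motif_dict : List (String × List String)) : List (String × Int) :=
  -- counts = {category: 0 for category in motif_dict.keys()}
  let counts : PySem.Dict String Int :=
    motif_dict.foldl (fun d p => d.insert p.1 0) PySem.Dict.empty
  -- window_set = set(window_tokens)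
  let windowSet : PySem.Set String := PySem.Set.ofList window_tokens
  -- for category, words in motif_dict.items(): for word in words:
  --   if word in window_set: counts[category] += window_tokens.count(word)
  let counts :=
    motif_dict.foldl (fun d p =>
      p.2.foldl (fun d w =>
        if windowSet.contains w then
          d.modify p.1 0 (· + (PySem.List.count window_tokens w : Int))
        else d) d) counts
  counts.items

-- ===== PORT B =====
def count_motifs_in_window_alt (window_tokens : List String) (motif_dict : List (String × List String)) : List (String × Int) :=
  -- for category, words in motif_dict.items():
  --   counts[category] = 0
  --   for word in words: index.setdefault(word, []).append(category)
  let init : PySem.Dict String Int × PySem.Dict String (List String) :=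
    motif_dict.foldl (fun cd p =>
      (cd.1.insert p.1 0,
       p.2.foldl (fun ix w => ix.modify w [] (· ++ [p.1])) cd.2))
      (PySem.Dict.empty, PySem.Dict.empty)
  -- for token in window_tokens: for category in index.get(token, []): counts[category] += 1
  let counts :=
    window_tokens.foldl (fun cd t =>
      (init.2.getD t []).foldl (fun cd c => cd.modify c 0 (· + 1)) cd) init.1
  counts.items

-- ===== PRECONDITION & SPEC =====
def Spec_count_motifs_in_window (window_tokens : List String) (motif_dict : List (String × List String)) (out : List (String × Int)) : Prop := out = count_motifs_in_window_alt window_tokens motif_dict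
instance (window_tokens : List String) (motif_dict : List (String × List String)) (out : List (String × Int)) : Decidable (Spec_count_motifs_in_window window_tokens motif_dict out) := by unfold Spec_count_motifs_in_window; infer_instance

-- ===== CLAIM (what is proved, stated in full; the proofs are below) =====
def Claim_equal_count_motifs_in_window : Prop := ∀ (window_tokens : List String) (motif_dict : List (String × List String)), Dom_count_motifs_in_window window_tokens motif_dict → Spec_count_motifs_in_window window_tokens motif_dict (count_motifs_in_window window_tokens motif_dict)

-- ===== LEMMAS AND PROOFS =====


-- keys of a fold of guarded modifies at keys already present are unchanged
theorem pv_keys_foldl_cond_modify {α ν : Type} (l : List α) (k : α → String) (cond : α → Bool)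
    (d0 : ν) (f : α → ν → ν) (d : PySem.Dict String ν) (h : ∀ x ∈ l, k x ∈ d.keys) :
    (l.foldl (fun d x => if cond x then d.modify (k x) d0 (f x) else d) d).keys = d.keys := by
  induction l generalizing d with
  | nil => rfl
  | cons x t ih =>
    simp only [List.foldl_cons]
    by_cases hc : cond x = true
    · have hk : (d.modify (k x) d0 (f x)).keys = d.keys := by
        rw [PySem.Dict.keys_modify, PySem.Dict.keys_insert_of_contains]
        exact (PySem.Dict.contains_iff_mem_keys _ _).mpr (h x (by simp))
      rw [hc, if_pos rfl, ih _ (fun y hy => by rw [hk]; exact h y (List.mem_cons_of_mem _ hy)), hk]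
    · rw [if_neg hc, ih _ (fun y hy => h y (List.mem_cons_of_mem _ hy))]

-- value of a fold of guarded additive modifies
theorem pv_getD_foldl_cond_modify {α : Type} (l : List α) (k : α → String) (cond : α → Bool)
    (amt : α → Int) (d : PySem.Dict String Int) (c : String) :
    (l.foldl (fun d x => if cond x then d.modify (k x) 0 (· + amt x) else d) d).getD c 0
      = d.getD c 0 + ((l.filter (fun x => cond x && (k x == c))).map amt).sum := by
  induction l generalizing d with
  | nil => simp
  | cons x t ih =>
    simp only [List.foldl_cons, List.filter_cons]
    by_cases hc : cond x = true
    · rw [hc, if_pos rfl, ih]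
      by_cases hk : k x = c
      · simp [hk]; ring
      · have : (k x == c) = false := by simp [hk]
        simp [this, PySem.Dict.getD_modify]
        intro h; exact absurd h.symm hk
    · have : cond x = false := by simpa using hc
      simp [this, ih]

-- sum over a filter equals sum of the if-guarded terms
theorem pv_sum_filter_ite {α : Type} (l : List α) (p : α → Bool) (f : α → Int) :
    ((l.filter p).map f).sum = (l.map (fun x => if p x then f x else 0)).sum := by
  induction l with
  | nil => rfl
  | cons x t ih =>
    by_cases hp : p x = true
    · simp [hp, ih]
    · have : p x = false := by simpa using hp
      simp [this, ih]

-- dropping words not in the window set does not change the total count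
theorem pv_sum_filter_contains (wt ws : List String) :
    ((ws.filter (fun w => (PySem.Set.ofList wt).contains w)).map
        (fun w => (PySem.List.count wt w : Int))).sum
      = (ws.map (fun w => (PySem.List.count wt w : Int))).sum := by
  rw [pv_sum_filter_ite]
  congr 1
  apply List.map_congr_left
  intro w _
  by_cases hw : w ∈ wt
  · rw [if_pos ((PySem.Set.contains_iff _ _).mpr ((PySem.Set.mem_ofList _ _).mpr hw))]
  · have h1 : (PySem.List.count wt w : Int) = 0 := by
      rw [PySem.List.count_eq]; simp [List.count_eq_zero.mpr hw]
    rw [h1]; simp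

-- the common total: for category c, one term per motif_dict pair
def pvTotal (wt : List String) (md : List (String × List String)) (c : String) : Int :=
  (md.map (fun p => if p.1 = c then (p.2.map (fun w => (PySem.List.count wt w : Int))).sum else 0)).sum

-- A's accumulation loop, characterized
theorem pv_A_getD (wt : List String) (md : List (String × List String))
    (d : PySem.Dict String Int) (c : String) :
    (md.foldl (fun d p =>
        p.2.foldl (fun d w =>
          if (PySem.Set.ofList wt).contains w then
            d.modify p.1 0 (· + (PySem.List.count wt w : Int))
          else d) d) d).getD c 0
      = d.getD c 0 + pvTotal wt md c := by
  induction md generalizing d with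
  | nil => simp [pvTotal]
  | cons p t ih =>
    simp only [List.foldl_cons]
    rw [ih]
    rw [pv_getD_foldl_cond_modify (k := fun _ => p.1) (cond := fun w => (PySem.Set.ofList wt).contains w)]
    have hstep : ((p.2.filter (fun x => (PySem.Set.ofList wt).contains x && (p.1 == c))).map
        (fun w => (PySem.List.count wt w : Int))).sum
        = if p.1 = c then (p.2.map (fun w => (PySem.List.count wt w : Int))).sum else 0 := by
      by_cases hk : p.1 = c
      · have : (fun x => (PySem.Set.ofList wt).contains x && (p.1 == c))
              = (fun x => (PySem.Set.ofList wt).contains x) := by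
          funext x; simp [hk]
        rw [this, pv_sum_filter_contains, if_pos hk]
      · have : (fun x => (PySem.Set.ofList wt).contains x && (p.1 == c))
              = (fun _ => false) := by
          funext x; simp [hk]
        rw [this]
        simp [List.filter_false, hk]
    rw [hstep]
    simp [pvTotal]
    ring

-- the inverted index, characterized: index[t] lists the category of every matching (word, category) occurrence
theorem pv_idx_getD (md : List (String × List String)) (ix : PySem.Dict String (List String)) (t : String) :
    (md.foldl (fun ix p => p.2.foldl (fun ix w => ix.modify w [] (· ++ [p.1])) ix) ix).getD t []
      = ix.getD t [] ++ md.flatMap (fun p => (p.2.filter (fun w => w == t)).map (fun _ => p.1)) := by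
  induction md generalizing ix with
  | nil => simp
  | cons p r ih =>
    simp only [List.foldl_cons, List.flatMap_cons]
    rw [ih]
    have hinner : (p.2.foldl (fun ix w => ix.modify w [] (· ++ [p.1])) ix)
        = ((p.2.map (fun w => (w, p.1))).foldl (fun d q => d.modify q.1 [] (· ++ [q.2])) ix) := by
      rw [List.foldl_map]
    rw [hinner, PySem.Dict.getD_foldl_modify_append]
    have : ((p.2.map (fun w => (w, p.1))).filter (fun q => q.1 == t)).map (fun q => q.2)
        = (p.2.filter (fun w => w == t)).map (fun _ => p.1) := by
      rw [List.filter_map, List.map_map]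
      rfl
    rw [this, List.append_assoc]

-- B's counting loop, characterized
theorem pv_B_getD (wt : List String) (idx : PySem.Dict String (List String))
    (d : PySem.Dict String Int) (c : String) :
    (wt.foldl (fun cd t => (idx.getD t []).foldl (fun cd c => cd.modify c 0 (· + 1)) cd) d).getD c 0
      = d.getD c 0 + (wt.map (fun t => (List.count c (idx.getD t []) : Int))).sum := by
  induction wt generalizing d with
  | nil => simp
  | cons t r ih =>
    simp only [List.foldl_cons, List.map_cons, List.sum_cons]
    rw [ih, PySem.Dict.getD_foldl_modify_add_one]
    ring

-- double counting: summing counts of xs-elements in ys = summing counts of ys-elements in xs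
theorem pv_sum_swap {α β : Type} (xs : List α) (ys : List β) (f : α → β → Int) :
    (xs.map (fun x => (ys.map (f x)).sum)).sum = (ys.map (fun y => (xs.map (fun x => f x y)).sum)).sum := by
  induction xs with
  | nil => simp
  | cons x r ih =>
    simp only [List.map_cons, List.sum_cons, ih]
    rw [← PySem.List.sum_map_add_int]

theorem pv_count_swap (xs ys : List String) :
    (xs.map (fun x => (List.count x ys : Int))).sum = (ys.map (fun y => (List.count y xs : Int))).sum := by
  have h1 : ∀ (a : String) (l : List String),
      (List.count a l : Int) = (l.map (fun b => if b = a then (1:Int) else 0)).sum := by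
    intro a l
    induction l with
    | nil => simp
    | cons b r ih => by_cases hb : b = a <;> simp [List.count_cons, hb, ih] <;> ring
  calc (xs.map (fun x => (List.count x ys : Int))).sum
      = (xs.map (fun x => (ys.map (fun y => if y = x then (1:Int) else 0)).sum)).sum := by
        apply congrArg; apply List.map_congr_left; intro x _; exact h1 x ys
    _ = (ys.map (fun y => (xs.map (fun x => if y = x then (1:Int) else 0)).sum)).sum := pv_sum_swap xs ys _
    _ = (ys.map (fun y => (List.count y xs : Int))).sum := by
        apply congrArg; apply List.map_congr_left; intro y _
        rw [h1 y xs]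
        apply congrArg; apply List.map_congr_left; intro x _
        by_cases h : x = y
        · simp [h]
        · simp only [if_neg h, if_neg (fun hyx : y = x => h hyx.symm)]

-- counting category c in one index entry, summed over the window, gives pvTotal
theorem pv_count_map_const {α : Type} (l : List α) (a c : String) :
    (List.count c (l.map (fun _ => a)) : Int) = if a = c then (l.length : Int) else 0 := by
  induction l with
  | nil => simp
  | cons x r ih => by_cases h : a = c <;> simp [List.count_cons, h] at ih ⊢ <;> omega

theorem pv_count_flatMap (md : List (String × List String)) (t c : String) :
    (List.count c (md.flatMap (fun p => (p.2.filter (fun w => w == t)).map (fun _ => p.1))) : Int)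
      = (md.map (fun p => if p.1 = c then (List.count t p.2 : Int) else 0)).sum := by
  induction md with
  | nil => simp
  | cons p r ih =>
    simp only [List.flatMap_cons, List.count_append, List.map_cons, List.sum_cons]
    push_cast
    rw [ih, pv_count_map_const]
    have hlen : ((p.2.filter (fun w => w == t)).length : Int) = (List.count t p.2 : Int) := by
      simp [List.count, List.countP_eq_length_filter]
    by_cases h : p.1 = c <;> simp [h, hlen]

theorem pv_B_total (wt : List String) (md : List (String × List String)) (c : String) :
    (wt.map (fun t => (List.count c
        ((md.foldl (fun ix p => p.2.foldl (fun ix w => ix.modify w [] (· ++ [p.1])) ix)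
            PySem.Dict.empty).getD t []) : Int))).sum
      = pvTotal wt md c := by
  have h1 : ∀ t, (md.foldl (fun ix p => p.2.foldl (fun ix w => ix.modify w [] (· ++ [p.1])) ix)
      PySem.Dict.empty).getD t [] = md.flatMap (fun p => (p.2.filter (fun w => w == t)).map (fun _ => p.1)) := by
    intro t; rw [pv_idx_getD]; simp
  calc (wt.map (fun t => (List.count c
        ((md.foldl (fun ix p => p.2.foldl (fun ix w => ix.modify w [] (· ++ [p.1])) ix)
            PySem.Dict.empty).getD t []) : Int))).sum
      = (wt.map (fun t => (md.map (fun p => if p.1 = c then (List.count t p.2 : Int) else 0)).sum)).sum := by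
        apply congrArg; apply List.map_congr_left; intro t _
        rw [h1 t, pv_count_flatMap]
    _ = (md.map (fun p => (wt.map (fun t => if p.1 = c then (List.count t p.2 : Int) else 0)).sum)).sum :=
        pv_sum_swap wt md _
    _ = pvTotal wt md c := by
        unfold pvTotal
        apply congrArg; apply List.map_congr_left; intro p _
        by_cases h : p.1 = c
        · have he : (fun t => if p.1 = c then (List.count t p.2 : Int) else 0)
              = fun t => (List.count t p.2 : Int) := by funext t; rw [if_pos h]
          rw [he, if_pos h, pv_count_swap]
          apply congrArg; apply List.map_congr_left; intro w _
          rw [PySem.List.count_eq]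
        · simp [h]

-- the zero-initialised counts dict: every lookup with default 0 is 0
theorem pv_init_getD (md : List (String × List String)) (d : PySem.Dict String Int) (c : String)
    (h : d.getD c 0 = 0) :
    (md.foldl (fun d p => d.insert p.1 0) d).getD c 0 = 0 := by
  induction md generalizing d with
  | nil => exact h
  | cons p r ih =>
    simp only [List.foldl_cons]
    refine ih _ ?_
    rw [PySem.Dict.getD_insert]
    by_cases hc : c = p.1 <;> simp [hc, h]

-- keys of an unguarded modify fold at keys already present are unchanged
theorem pv_keys_foldl_modify {ν : Type} (l : List String) (d0 : ν) (f : ν → ν)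
    (d : PySem.Dict String ν) (h : ∀ x ∈ l, x ∈ d.keys) :
    (l.foldl (fun d x => d.modify x d0 f) d).keys = d.keys := by
  induction l generalizing d with
  | nil => rfl
  | cons x t ih =>
    simp only [List.foldl_cons]
    have hk : (d.modify x d0 f).keys = d.keys := by
      rw [PySem.Dict.keys_modify, PySem.Dict.keys_insert_of_contains]
      exact (PySem.Dict.contains_iff_mem_keys _ _).mpr (h x (by simp))
    rw [ih _ (fun y hy => by rw [hk]; exact h y (List.mem_cons_of_mem _ hy)), hk]

-- A's accumulation loop keeps the key list
theorem pv_A_keys (wt : List String) (md : List (String × List String))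
    (d : PySem.Dict String Int) (h : ∀ p ∈ md, p.1 ∈ d.keys) :
    (md.foldl (fun d p =>
        p.2.foldl (fun d w =>
          if (PySem.Set.ofList wt).contains w then
            d.modify p.1 0 (· + (PySem.List.count wt w : Int))
          else d) d) d).keys = d.keys := by
  induction md generalizing d with
  | nil => rfl
  | cons p r ih =>
    simp only [List.foldl_cons]
    have hk : (p.2.foldl (fun d w =>
        if (PySem.Set.ofList wt).contains w then
          d.modify p.1 0 (· + (PySem.List.count wt w : Int))
        else d) d).keys = d.keys :=
      pv_keys_foldl_cond_modify p.2 (fun _ => p.1) _ 0 _ d (fun _ _ => h p (by simp))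
    rw [ih _ (fun q hq => by rw [hk]; exact h q (List.mem_cons_of_mem _ hq)), hk]

-- B's counting loop keeps the key list
theorem pv_B_keys (wt : List String) (idx : PySem.Dict String (List String))
    (d : PySem.Dict String Int) (h : ∀ t ∈ wt, ∀ c ∈ idx.getD t [], c ∈ d.keys) :
    (wt.foldl (fun cd t => (idx.getD t []).foldl (fun cd c => cd.modify c 0 (· + 1)) cd) d).keys
      = d.keys := by
  induction wt generalizing d with
  | nil => rfl
  | cons t r ih =>
    simp only [List.foldl_cons]
    have hk : ((idx.getD t []).foldl (fun cd c => cd.modify c 0 (· + 1)) d).keys = d.keys :=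
      pv_keys_foldl_modify _ 0 _ d (fun c hc => h t (by simp) c hc)
    rw [ih _ (fun t' ht' c hc => by rw [hk]; exact h t' (List.mem_cons_of_mem _ ht') c hc), hk]

theorem pv_main (wt : List String) (md : List (String × List String)) :
    count_motifs_in_window wt md = count_motifs_in_window_alt wt md := by
  simp only [count_motifs_in_window, count_motifs_in_window_alt]
  rw [PySem.List.foldl_prod_mk
    (f := fun (a : PySem.Dict String Int) (p : String × List String) => a.insert p.1 0)
    (g := fun (b : PySem.Dict String (List String)) (p : String × List String) =>
      p.2.foldl (fun ix w => ix.modify w [] (· ++ [p.1])) b)]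
  set counts0 : PySem.Dict String Int := md.foldl (fun d p => d.insert p.1 0) PySem.Dict.empty with hc0
  set idx : PySem.Dict String (List String) :=
    md.foldl (fun ix p => p.2.foldl (fun ix w => ix.modify w [] (· ++ [p.1])) ix) PySem.Dict.empty with hidx
  have hkeys0 : counts0.keys = PySem.Set.update ([] : List String) (md.map (fun p => p.1)) := by
    rw [hc0, PySem.Dict.keys_foldl_insert_key md (fun p => p.1) (fun _ _ => 0), PySem.Dict.keys_empty]
  have hmem : ∀ p ∈ md, p.1 ∈ counts0.keys := by
    intro p hp
    rw [hkeys0]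
    exact (PySem.Set.mem_update _ _ _).mpr (Or.inr (List.mem_map_of_mem hp))
  have hnd : counts0.keys.Nodup :=
    PySem.Dict.nodup_keys_foldl_insert_key md (fun p => p.1) (fun _ _ => 0) _
      (by rw [PySem.Dict.keys_empty]; exact List.nodup_nil)
  have hidxmem : ∀ t ∈ wt, ∀ c ∈ idx.getD t [], c ∈ counts0.keys := by
    intro t _ c hc
    rw [hidx, pv_idx_getD, PySem.Dict.getD_empty, List.nil_append, List.mem_flatMap] at hc
    obtain ⟨p, hp, hcp⟩ := hc
    obtain ⟨w, _, rfl⟩ := List.mem_map.mp hcp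
    exact hmem p hp
  have hkA := pv_A_keys wt md counts0 hmem
  have hkB := pv_B_keys wt idx counts0 hidxmem
  rw [PySem.Dict.items_eq_map_keys _ (hkA ▸ hnd) 0, PySem.Dict.items_eq_map_keys _ (hkB ▸ hnd) 0,
      hkA, hkB]
  apply List.map_congr_left
  intro c _
  have hA := pv_A_getD wt md counts0 c
  have hB := pv_B_getD wt idx counts0 c
  have h0 : counts0.getD c 0 = 0 := pv_init_getD md _ c (PySem.Dict.getD_empty _ _)
  have hBt := pv_B_total wt md c
  rw [← hidx] at hBt
  rw [hA, hB, h0, hBt, zero_add]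

-- ===== VERDICT (by name: the statement is the Claim_ definition above) =====
theorem count_motifs_in_window_spec : Claim_equal_count_motifs_in_window := by
  intro wt md _
  unfold Spec_count_motifs_in_window
  exact pv_main wt md
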